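-- pv_equiv track=rewrite | github.com/UlricWu/min_quant | tests/e2e/test_feature_build_step_contract.py | _build_index_python
-- ===== SOURCE A (Python) =====
-- from typing import Dict, Tuple
--
-- def _build_index_python(symbols: list[str]) -> Dict[str, Tuple[int, int]]:
--     """
--     纯 Python reference: 假定 symbols 已按 symbol 分块连续
--     返回 {symbol: (start, length)}
--     """
--     if not symbols:
--         return {}
--
--     index: Dict[str, Tuple[int, int]] = {}
--     start = 0
--     cur = symbols[0]
--     for i in range(1, len(symbols)):
--         if symbols[i] != cur:
--             index[cur] = (start, i - start)
--             start = i
--             cur = symbols[i]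
--     index[cur] = (start, len(symbols) - start)
--     return index
-- ===== SOURCE B (Python) =====
-- from typing import Dict, Tuple
--
-- def _build_index_python(symbols: list[str]) -> Dict[str, Tuple[int, int]]:
--     if not symbols:
--         return {}
--     n = len(symbols)
--     # stage 1: run starts — position 0 plus every position after an adjacent mismatch,
--     # each paired with the symbol that starts the run
--     starts = [(0, symbols[0])] + [(i + 1, b)
--                                   for i, (a, b) in enumerate(zip(symbols, symbols[1:]))
--                                   if a != b]
--     # stage 2: each run ends where the next one starts; the last ends at n
--     ends = [s for s, _ in starts[1:]] + [n]
--     return {sym: (s, e - s) for (s, sym), e in zip(starts, ends)}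
-- ===== Notes on version B (the rewrite author's own statement) =====
-- stated objective: alternative
-- what changed: B replaces A's single stateful pass (carrying cur/start with a trailing final insert) by a staged pipeline: first compute the list of run starts from adjacent mismatches of zip(symbols, symbols[1:]), then derive each run's end as the next run's start (or n), then build the dict from the zipped (start, symbol, end) records.
import Mathlib
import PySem

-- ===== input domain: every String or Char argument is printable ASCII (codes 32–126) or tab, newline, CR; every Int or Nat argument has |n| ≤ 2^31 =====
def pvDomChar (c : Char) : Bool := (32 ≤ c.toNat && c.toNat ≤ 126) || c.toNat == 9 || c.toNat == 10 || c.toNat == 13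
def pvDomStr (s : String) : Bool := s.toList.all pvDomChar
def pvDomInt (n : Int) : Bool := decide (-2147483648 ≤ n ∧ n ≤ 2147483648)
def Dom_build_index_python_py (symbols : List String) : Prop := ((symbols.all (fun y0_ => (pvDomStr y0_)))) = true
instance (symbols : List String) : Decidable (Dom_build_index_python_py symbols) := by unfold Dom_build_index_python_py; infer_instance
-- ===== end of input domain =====

-- B rebuilds the same index by a staged pipeline (run starts from adjacent mismatches,
-- ends from the next start, then one dict build) instead of A's stateful pass; same value proved.

-- ===== PORT A =====
-- A's loop 'for i in range(1, len(symbols))' transcribed as structural recursion over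
-- symbols[i:], carrying (index, start, cur, i); when the tail is empty, i = len(symbols)
-- and the final 'index[cur] = (start, len(symbols) - start)' is performed.
def buildIndexLoopA (index : PySem.Dict String (Int × Int)) (start : Int) (cur : String)
    (i : Int) : List String → PySem.Dict String (Int × Int)
  | [] => index.insert cur (start, i - start)
  | s :: rest =>
    if s ≠ cur then
      buildIndexLoopA (index.insert cur (start, i - start)) i s (i + 1) rest
    else
      buildIndexLoopA index start cur (i + 1) rest

def build_index_python_py (symbols : List String) : List (String × Int × Int) :=
  match symbols with
  | [] => (PySem.Dict.empty : PySem.Dict String (Int × Int)).items.map (fun p => (p.1, p.2))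
  | c0 :: rest => (buildIndexLoopA PySem.Dict.empty 0 c0 1 rest).items.map (fun p => (p.1, p.2))

-- ===== PORT B =====
def build_index_python_py_alt (symbols : List String) : List (String × Int × Int) :=
  match symbols with
  | [] => (PySem.Dict.empty : PySem.Dict String (Int × Int)).items.map (fun p => (p.1, p.2))
  | c :: _ =>
    let n : Int := symbols.length
    -- [(i+1, b) for i, (a, b) in enumerate(zip(symbols, symbols[1:])) if a != b]
    -- (comprehension with a filter ported as filterMap; symbols[1:] via PySem slice)
    let starts : List (Int × String) :=
      (0, c) :: (PySem.List.enumerate (symbols.zip (PySem.List.slice symbols (some 1) none))).filterMap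
        (fun p => if p.2.1 ≠ p.2.2 then some (p.1 + 1, p.2.2) else none)
    let ends : List Int := (starts.tail.map Prod.fst) ++ [n]
    let final := (starts.zip ends).foldl
      (fun (d : PySem.Dict String (Int × Int)) pe => d.insert pe.1.2 (pe.1.1, pe.2 - pe.1.1))
      PySem.Dict.empty
    final.items.map (fun p => (p.1, p.2))

-- ===== PRECONDITION & SPEC =====
def Spec_build_index_python_py (symbols : List String) (out : List (String × Int × Int)) : Prop := out = build_index_python_py_alt symbols
instance (symbols : List String) (out : List (String × Int × Int)) : Decidable (Spec_build_index_python_py symbols out) := by unfold Spec_build_index_python_py; infer_instance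

-- ===== CLAIM =====
def Claim_equal_build_index_python_py : Prop := ∀ (symbols : List String), Dom_build_index_python_py symbols → Spec_build_index_python_py symbols (build_index_python_py symbols)

-- ===== LEMMAS AND PROOFS =====

-- canonical run list: (key, start, length) triples of the contiguous runs of cur :: xs,
-- where cur's run began at absolute position start and i is the next absolute index
def runsT (cur : String) (start i : Int) : List String → List (String × Int × Int)
  | [] => [(cur, start, i - start)]
  | x :: xs => if x = cur then runsT cur start (i + 1) xs
               else (cur, start, i - start) :: runsT x i (i + 1) xs

-- boundary scan: S j (x :: y :: t) emits (j+1, y) when x ≠ y (j = absolute index of x)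
def bndS (j : Int) : List String → List (Int × String)
  | x :: y :: t => if x ≠ y then (j + 1, y) :: bndS (j + 1) (y :: t) else bndS (j + 1) (y :: t)
  | _ => []

theorem loopA_eq_fold (rest : List String) (index : PySem.Dict String (Int × Int))
    (start : Int) (cur : String) (i : Int) :
    buildIndexLoopA index start cur i rest =
      (runsT cur start i rest).foldl (fun d t => d.insert t.1 t.2) index := by
  induction rest generalizing index start cur i with
  | nil => simp [buildIndexLoopA, runsT]
  | cons x xs ih =>
    by_cases h : x = cur
    · subst h
      simp only [buildIndexLoopA, runsT, ne_eq, not_true_eq_false, if_false]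
      exact ih ..
    · simp only [buildIndexLoopA, runsT, ne_eq, h, not_false_eq_true, if_pos]
      exact ih ..

-- B's filterMap over enumerate(zip …) is the boundary scan bndS
theorem filterMap_eq_bndS (xs : List String) : ∀ (x : String) (j : Int),
    (PySem.List.enumerate ((x :: xs).zip xs) j).filterMap
        (fun p => if p.2.1 ≠ p.2.2 then some (p.1 + 1, p.2.2) else none)
      = bndS j (x :: xs) := by
  induction xs with
  | nil => intro x j; simp [bndS, PySem.List.enumerate_nil]
  | cons y t ih =>
    intro x j
    simp only [List.zip_cons_cons, PySem.List.enumerate_cons, List.filterMap_cons, bndS]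
    by_cases h : x = y
    · simp only [h, ne_eq, not_true_eq_false, if_false]
      simpa using ih y (j + 1)
    · simp only [ne_eq, h, not_false_eq_true, if_true]
      simpa using ih y (j + 1)

-- zipping the starts with the ends reconstructs exactly the run triples
theorem zip_starts_ends (xs : List String) (cur : String) (start i : Int) :
    (((start, cur) :: bndS (i - 1) (cur :: xs)).zip
        ((((start, cur) :: bndS (i - 1) (cur :: xs)).tail.map Prod.fst) ++ [i + xs.length])).map
        (fun pe => (pe.1.2, pe.1.1, pe.2 - pe.1.1))
      = runsT cur start i xs := by
  induction xs generalizing cur start i with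
  | nil => simp [bndS, runsT]
  | cons x t ih =>
    by_cases h : x = cur
    · subst h
      have hb : bndS (i - 1) (x :: x :: t) = bndS i (x :: t) := by
        simp [bndS, show i - 1 + 1 = i from by ring]
      have hih := ih x start (i + 1)
      rw [show i + 1 - 1 = i from by ring] at hih
      have hlen : i + ((x :: t).length : Int) = i + 1 + (t.length : Int) := by
        push_cast [List.length_cons]; ring
      simp only [runsT, hb, hlen]
      exact hih
    · have hb : bndS (i - 1) (cur :: x :: t) = (i, x) :: bndS i (x :: t) := by
        have h' : ¬cur = x := fun he => h he.symm
        simp [bndS, h', show i - 1 + 1 = i from by ring]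
      have hih := ih x i (i + 1)
      rw [show i + 1 - 1 = i from by ring] at hih
      simp only [List.tail_cons] at hih
      have hlen : i + ((x :: t).length : Int) = i + 1 + (t.length : Int) := by
        push_cast [List.length_cons]; ring
      simp only [runsT, if_neg h, hb, hlen, List.tail_cons, List.map_cons, List.cons_append,
        List.zip_cons_cons]
      rw [hih]

-- fold over the zipped pairs = fold over the mapped triples
theorem foldl_zip_map (l : List ((Int × String) × Int)) (d : PySem.Dict String (Int × Int)) :
    l.foldl (fun d pe => d.insert pe.1.2 (pe.1.1, pe.2 - pe.1.1)) d
      = (l.map (fun pe => (pe.1.2, pe.1.1, pe.2 - pe.1.1))).foldl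
          (fun d t => d.insert t.1 t.2) d := by
  induction l generalizing d with
  | nil => rfl
  | cons p l ih => simp only [List.foldl_cons, List.map_cons]; exact ih _

-- ===== VERDICT =====
theorem build_index_python_py_spec : Claim_equal_build_index_python_py := by
  intro symbols _
  unfold Spec_build_index_python_py build_index_python_py build_index_python_py_alt
  cases symbols with
  | nil => rfl
  | cons c rest =>
    simp only [PySem.List.slice_from_one, List.tail_cons]
    rw [filterMap_eq_bndS rest c 0, loopA_eq_fold, foldl_zip_map]
    have h := zip_starts_ends rest c 0 1
    rw [show (1 : Int) - 1 = 0 from by ring] at h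
    rw [show ((c :: rest).length : Int) = 1 + (rest.length : Int) from by
      push_cast [List.length_cons]; ring]
    rw [← h]
    simp
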